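-- pv_equiv track=rewrite | github.com/ziyuhuang123/dataflow_code | delete.py | normalize_order
-- ===== SOURCE A (Python) =====
-- def transform_coordinates(order, transform):
--     return [transform(x, y) for x, y in order]
--
-- def rotate_90(x, y):
--     return (y, 3 - x)
--
-- def rotate_180(x, y):
--     return (3 - x, 3 - y)
--
-- def rotate_270(x, y):
--     return (3 - y, x)
--
-- def mirror_horizontal(x, y):
--     return (x, 3 - y)
--
-- def mirror_vertical(x, y):
--     return (3 - x, y)
--
-- def mirror_diagonal(x, y):
--     return (y, x)
--
-- def mirror_anti_diagonal(x, y):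
--     return (3 - y, 3 - x)
--
-- def normalize_order(order):
--     transforms = [
--         lambda x, y: (x, y),
--         rotate_90,
--         rotate_180,
--         rotate_270,
--         mirror_horizontal,
--         mirror_vertical,
--         mirror_diagonal,
--         mirror_anti_diagonal
--     ]
--
--     normalized_orders = []
--     for transform in transforms:
--         transformed_order = transform_coordinates(order, transform)
--         normalized_orders.append(tuple(transformed_order))
--
--     return min(normalized_orders)
-- ===== SOURCE B (Python) =====
-- def normalize_order(order):
--     # Successive-refinement selection: keep a shrinking set of candidate
--     # transforms, pruned position by position to the lexicographic argmin;
--     # only the winning transform is applied to produce the output.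
--     transforms = [
--         lambda x, y: (x, y),
--         lambda x, y: (y, 3 - x),
--         lambda x, y: (3 - x, 3 - y),
--         lambda x, y: (3 - y, x),
--         lambda x, y: (x, 3 - y),
--         lambda x, y: (3 - x, y),
--         lambda x, y: (y, x),
--         lambda x, y: (3 - y, 3 - x),
--     ]
--     survivors = transforms
--     for x, y in order:
--         best = min(t(x, y) for t in survivors)
--         survivors = [t for t in survivors if t(x, y) == best]
--     t = survivors[0]
--     return tuple(t(x, y) for x, y in order)
-- ===== Notes on version B (the rewrite author's own statement) =====
-- stated objective: alternative
-- what changed: B never materializes the 8 transformed tuples: it keeps a shrinking set of surviving transforms and prunes it position by position to the lexicographic argmin (min of the survivors' images at each coordinate), then applies only the single winning transform once at the end; A builds all 8 full transformed tuples and takes min over them.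
import Mathlib
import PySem

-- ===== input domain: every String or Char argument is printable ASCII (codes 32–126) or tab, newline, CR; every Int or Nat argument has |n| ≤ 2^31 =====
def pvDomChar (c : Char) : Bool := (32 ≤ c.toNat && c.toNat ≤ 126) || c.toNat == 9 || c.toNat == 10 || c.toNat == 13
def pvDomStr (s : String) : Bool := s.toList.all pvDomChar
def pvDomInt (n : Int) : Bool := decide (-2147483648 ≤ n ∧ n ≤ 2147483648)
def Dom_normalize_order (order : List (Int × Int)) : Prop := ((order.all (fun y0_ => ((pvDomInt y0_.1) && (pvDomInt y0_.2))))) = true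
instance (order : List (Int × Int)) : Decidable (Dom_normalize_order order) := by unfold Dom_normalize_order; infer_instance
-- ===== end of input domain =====

-- B selects the minimal symmetry by single-pass lexicographic pruning of the candidate
-- transforms (a shrinking survivor set), applying only the winner at the end, instead of
-- materializing all 8 transformed tuples and taking min; objective: alternative.


-- Python's tuple comparison, exact: lexicographic '<' on pairs of ints, then on equal-length
-- sequences of pairs; port of built-in min (first minimum wins; empty cases unreachable).
def pyLtP (a b : Int × Int) : Bool := decide (a.1 < b.1) || (a.1 == b.1 && decide (a.2 < b.2))

def pyLtL : List (Int × Int) → List (Int × Int) → Bool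
  | [], [] => false
  | [], _ :: _ => true
  | _ :: _, [] => false
  | a :: as, b :: bs => if a = b then pyLtL as bs else pyLtP a b

def pyMinStep (m x : List (Int × Int)) : List (Int × Int) := if pyLtL x m then x else m

def pyMin : List (List (Int × Int)) → List (Int × Int)
  | [] => []
  | h :: t => t.foldl pyMinStep h

def pyMinStepP (m x : Int × Int) : Int × Int := if pyLtP x m then x else m

def pyMinP : List (Int × Int) → Int × Int
  | [] => (0, 0)
  | h :: t => t.foldl pyMinStepP h

-- ===== PORT A =====
def transform_coordinates (order : List (Int × Int)) (transform : Int → Int → Int × Int) : List (Int × Int) :=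
  order.map (fun p => transform p.1 p.2)

def rotate_90 (x y : Int) : Int × Int := (y, 3 - x)
def rotate_180 (x y : Int) : Int × Int := (3 - x, 3 - y)
def rotate_270 (x y : Int) : Int × Int := (3 - y, x)
def mirror_horizontal (x y : Int) : Int × Int := (x, 3 - y)
def mirror_vertical (x y : Int) : Int × Int := (3 - x, y)
def mirror_diagonal (x y : Int) : Int × Int := (y, x)
def mirror_anti_diagonal (x y : Int) : Int × Int := (3 - y, 3 - x)

def normalize_order (order : List (Int × Int)) : List (Int × Int) :=
  let transforms : List (Int → Int → Int × Int) :=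
    [fun x y => (x, y), rotate_90, rotate_180, rotate_270,
     mirror_horizontal, mirror_vertical, mirror_diagonal, mirror_anti_diagonal]
  let normalized_orders :=
    transforms.foldl (fun acc transform => acc ++ [transform_coordinates order transform]) []
  pyMin normalized_orders

-- ===== PORT B =====
def pvTransformsB : List (Int → Int → Int × Int) :=
  [fun x y => (x, y), fun x y => (y, 3 - x), fun x y => (3 - x, 3 - y), fun x y => (3 - y, x),
   fun x y => (x, 3 - y), fun x y => (3 - x, y), fun x y => (y, x), fun x y => (3 - y, 3 - x)]

-- one pruning step of B's loop body: keep the survivors minimal at this position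
def stepB (surv : List (Int → Int → Int × Int)) (p : Int × Int) : List (Int → Int → Int × Int) :=
  let best := pyMinP (surv.map (fun t => t p.1 p.2))
  surv.filter (fun t => t p.1 p.2 == best)

def normalize_order_alt (order : List (Int × Int)) : List (Int × Int) :=
  let survivors := order.foldl stepB pvTransformsB
  match survivors with
  | [] => []                       -- unreachable: the survivor set is never empty
  | t :: _ => order.map (fun p => t p.1 p.2)

-- ===== PRECONDITION & SPEC =====
def Spec_normalize_order (order : List (Int × Int)) (out : List (Int × Int)) : Prop := out = normalize_order_alt order
instance (order : List (Int × Int)) (out : List (Int × Int)) : Decidable (Spec_normalize_order order out) := by unfold Spec_normalize_order; infer_instance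

-- ===== CLAIM (what is proved, stated in full; the proofs are below) =====
def Claim_equal_normalize_order : Prop := ∀ (order : List (Int × Int)), Dom_normalize_order order → Spec_normalize_order order (normalize_order order)

-- ===== LEMMAS AND PROOFS =====

lemma ltP_irrefl (a : Int × Int) : pyLtP a a = false := by simp [pyLtP]

lemma ltP_trans {a b c : Int × Int} (h1 : pyLtP a b = true) (h2 : pyLtP b c = true) : pyLtP a c = true := by
  simp [pyLtP] at *; omega

lemma ltP_connex {a b : Int × Int} (h1 : pyLtP a b = false) (h2 : pyLtP b a = false) : a = b := by
  simp [pyLtP] at *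
  exact Prod.ext (by omega) (by omega)

lemma ltL_irrefl : ∀ a : List (Int × Int), pyLtL a a = false
  | [] => rfl
  | x :: xs => by simp [pyLtL, ltL_irrefl xs]

lemma ltL_trans : ∀ {a b c : List (Int × Int)}, pyLtL a b = true → pyLtL b c = true → pyLtL a c = true
  | [], [], _, h1, _ => by simp [pyLtL] at h1
  | [], _ :: _, [], _, h2 => by simp [pyLtL] at h2
  | [], _ :: _, _ :: _, _, _ => by simp [pyLtL]
  | _ :: _, [], _, h1, _ => by simp [pyLtL] at h1
  | _ :: _, _ :: _, [], _, h2 => by simp [pyLtL] at h2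
  | x :: xs, y :: ys, z :: zs, h1, h2 => by
    by_cases hxy : x = y
    · subst hxy
      by_cases hyz : x = z
      · subst hyz
        simp only [pyLtL] at h1 h2 ⊢
        exact ltL_trans h1 h2
      · simp only [pyLtL, if_neg hyz] at h2 ⊢
        exact h2
    · by_cases hyz : y = z
      · subst hyz
        simp only [pyLtL, if_neg hxy] at h1 ⊢
        exact h1
      · simp only [pyLtL, if_neg hxy, if_neg hyz] at h1 h2
        have hxz : pyLtP x z = true := ltP_trans h1 h2
        have hne : x ≠ z := by
          intro h; subst h
          have := ltP_trans h1 h2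
          simp [ltP_irrefl] at this
        simp only [pyLtL, if_neg hne]
        exact hxz

lemma ltL_connex : ∀ {a b : List (Int × Int)}, pyLtL a b = false → pyLtL b a = false → a = b
  | [], [], _, _ => rfl
  | [], _ :: _, h1, _ => by simp [pyLtL] at h1
  | _ :: _, [], _, h2 => by simp [pyLtL] at h2
  | x :: xs, y :: ys, h1, h2 => by
    by_cases hxy : x = y
    · subst hxy
      simp only [pyLtL] at h1 h2
      exact congrArg (x :: ·) (ltL_connex h1 h2)
    · simp only [pyLtL, if_neg hxy, if_neg (Ne.symm hxy)] at h1 h2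
      exact absurd (ltP_connex h1 h2) hxy

-- foldl invariant for Python's min on pairs
lemma foldlP_prop : ∀ (t : List (Int × Int)) (m : Int × Int),
    (t.foldl pyMinStepP m = m ∨ t.foldl pyMinStepP m ∈ t) ∧
    pyLtP m (t.foldl pyMinStepP m) = false ∧
    (∀ x ∈ t, pyLtP x (t.foldl pyMinStepP m) = false)
  | [], m => ⟨Or.inl rfl, ltP_irrefl m, by simp⟩
  | y :: ys, m => by
    have ih := foldlP_prop ys (pyMinStepP m y)
    obtain ⟨ihm, ihle, ihall⟩ := ih
    have hfold : (y :: ys).foldl pyMinStepP m = ys.foldl pyMinStepP (pyMinStepP m y) := rfl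
    rw [hfold]
    set r := ys.foldl pyMinStepP (pyMinStepP m y) with hr
    have hym : pyMinStepP m y = y ∨ pyMinStepP m y = m := by
      unfold pyMinStepP; split <;> simp
    have hmle : pyLtP m r = false := by
      by_cases hym2 : pyLtP y m = true
      · have hstep : pyMinStepP m y = y := by simp [pyMinStepP, hym2]
        rw [hstep] at ihle
        cases hmr : pyLtP m r
        · rfl
        · exact absurd (ltP_trans hym2 hmr) (by simp [ihle])
      · simp only [Bool.not_eq_true] at hym2
        have hstep : pyMinStepP m y = m := by simp [pyMinStepP, hym2]
        rw [hstep] at ihle; exact ihle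
    refine ⟨?_, hmle, ?_⟩
    · rcases ihm with h | h
      · rcases hym with h2 | h2
        · exact Or.inr (by rw [h, h2]; exact List.mem_cons_self)
        · exact Or.inl (by rw [h, h2])
      · exact Or.inr (List.mem_cons_of_mem _ h)
    · intro x hx
      rcases List.mem_cons.mp hx with hxy | hxys
      · subst hxy
        by_cases hym2 : pyLtP x m = true
        · have hstep : pyMinStepP m x = x := by simp [pyMinStepP, hym2]
          rw [hstep] at ihle; exact ihle
        · simp only [Bool.not_eq_true] at hym2
          cases hxr : pyLtP x r
          · rfl
          · cases hmx : pyLtP m x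
            · have := ltP_connex hym2 hmx
              subst this; rw [hxr] at hmle; exact hmle
            · exact absurd (ltP_trans hmx hxr) (by simp [hmle])
      · exact ihall x hxys
  termination_by t => t.length

lemma pyMinP_spec (l : List (Int × Int)) (h : l ≠ []) :
    pyMinP l ∈ l ∧ ∀ x ∈ l, pyLtP x (pyMinP l) = false := by
  match l with
  | [] => exact absurd rfl h
  | h0 :: t =>
    have := foldlP_prop t h0
    obtain ⟨hm, hle, hall⟩ := this
    refine ⟨?_, ?_⟩
    · rcases hm with h | h
      · rw [show pyMinP (h0 :: t) = t.foldl pyMinStepP h0 from rfl, h]; exact List.mem_cons_self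
      · exact List.mem_cons_of_mem _ h
    · intro x hx
      rcases List.mem_cons.mp hx with h | h
      · subst h; exact hle
      · exact hall x h

-- foldl invariant for Python's min on sequences
lemma foldlL_prop : ∀ (t : List (List (Int × Int))) (m : List (Int × Int)),
    (t.foldl pyMinStep m = m ∨ t.foldl pyMinStep m ∈ t) ∧
    pyLtL m (t.foldl pyMinStep m) = false ∧
    (∀ x ∈ t, pyLtL x (t.foldl pyMinStep m) = false)
  | [], m => ⟨Or.inl rfl, ltL_irrefl m, by simp⟩
  | y :: ys, m => by
    have ih := foldlL_prop ys (pyMinStep m y)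
    obtain ⟨ihm, ihle, ihall⟩ := ih
    have hfold : (y :: ys).foldl pyMinStep m = ys.foldl pyMinStep (pyMinStep m y) := rfl
    rw [hfold]
    set r := ys.foldl pyMinStep (pyMinStep m y) with hr
    have hym : pyMinStep m y = y ∨ pyMinStep m y = m := by
      unfold pyMinStep; split <;> simp
    have hmle : pyLtL m r = false := by
      by_cases hym2 : pyLtL y m = true
      · have hstep : pyMinStep m y = y := by simp [pyMinStep, hym2]
        rw [hstep] at ihle
        cases hmr : pyLtL m r
        · rfl
        · exact absurd (ltL_trans hym2 hmr) (by simp [ihle])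
      · simp only [Bool.not_eq_true] at hym2
        have hstep : pyMinStep m y = m := by simp [pyMinStep, hym2]
        rw [hstep] at ihle; exact ihle
    refine ⟨?_, hmle, ?_⟩
    · rcases ihm with h | h
      · rcases hym with h2 | h2
        · exact Or.inr (by rw [h, h2]; exact List.mem_cons_self)
        · exact Or.inl (by rw [h, h2])
      · exact Or.inr (List.mem_cons_of_mem _ h)
    · intro x hx
      rcases List.mem_cons.mp hx with hxy | hxys
      · subst hxy
        by_cases hym2 : pyLtL x m = true
        · have hstep : pyMinStep m x = x := by simp [pyMinStep, hym2]
          rw [hstep] at ihle; exact ihle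
        · simp only [Bool.not_eq_true] at hym2
          cases hxr : pyLtL x r
          · rfl
          · cases hmx : pyLtL m x
            · have := ltL_connex hym2 hmx
              subst this; rw [hxr] at hmle; exact hmle
            · exact absurd (ltL_trans hmx hxr) (by simp [hmle])
      · exact ihall x hxys
  termination_by t => t.length

lemma pyMin_spec (l : List (List (Int × Int))) (h : l ≠ []) :
    pyMin l ∈ l ∧ ∀ x ∈ l, pyLtL x (pyMin l) = false := by
  match l with
  | [] => exact absurd rfl h
  | h0 :: t =>
    have := foldlL_prop t h0
    obtain ⟨hm, hle, hall⟩ := this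
    refine ⟨?_, ?_⟩
    · rcases hm with h | h
      · rw [show pyMin (h0 :: t) = t.foldl pyMinStep h0 from rfl, h]; exact List.mem_cons_self
      · exact List.mem_cons_of_mem _ h
    · intro x hx
      rcases List.mem_cons.mp hx with h | h
      · subst h; exact hle
      · exact hall x h

-- invariant of B's pruning pass: the survivor set is nonempty, is a subset of the
-- initial transforms, and every survivor is a lexicographic argmin over all transforms
lemma keyB : ∀ (order : List (Int × Int)) (ts : List (Int → Int → Int × Int)), ts ≠ [] →
    order.foldl stepB ts ≠ [] ∧
    ∀ f ∈ order.foldl stepB ts, f ∈ ts ∧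
      ∀ g ∈ ts, pyLtL (order.map (fun p => g p.1 p.2)) (order.map (fun p => f p.1 p.2)) = false
  | [], ts, hts => by
    refine ⟨hts, fun f hf => ⟨hf, fun g _ => rfl⟩⟩
  | p :: rest, ts, hts => by
    have hbestmem : pyMinP (ts.map (fun t => t p.1 p.2)) ∈ ts.map (fun t => t p.1 p.2) := by
      have : ts.map (fun t => t p.1 p.2) ≠ [] := by
        intro h; exact hts (List.map_eq_nil_iff.mp h)
      exact (pyMinP_spec _ this).1
    have hbestle : ∀ x ∈ ts.map (fun t => t p.1 p.2),
        pyLtP x (pyMinP (ts.map (fun t => t p.1 p.2))) = false := by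
      have : ts.map (fun t => t p.1 p.2) ≠ [] := by
        intro h; exact hts (List.map_eq_nil_iff.mp h)
      exact (pyMinP_spec _ this).2
    have hts' : stepB ts p ≠ [] := by
      obtain ⟨t0, ht0mem, ht0⟩ := List.mem_map.mp hbestmem
      intro hnil
      have := List.filter_eq_nil_iff.mp hnil t0 ht0mem
      simp only [beq_iff_eq] at this
      exact this ht0
    obtain ⟨hne, hall⟩ := keyB rest (stepB ts p) hts'
    have hfold : (p :: rest).foldl stepB ts = rest.foldl stepB (stepB ts p) := rfl
    rw [hfold]
    refine ⟨hne, ?_⟩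
    intro f hf
    obtain ⟨hfts', hmin'⟩ := hall f hf
    have hfm := List.mem_filter.mp hfts'
    have hfbest : f p.1 p.2 = pyMinP (ts.map (fun t => t p.1 p.2)) := by
      have := hfm.2; simpa using this
    refine ⟨hfm.1, ?_⟩
    intro g hg
    simp only [List.map_cons]
    show pyLtL (g p.1 p.2 :: rest.map (fun p => g p.1 p.2))
        (f p.1 p.2 :: rest.map (fun p => f p.1 p.2)) = false
    by_cases hgp : g p.1 p.2 = f p.1 p.2
    · simp only [pyLtL, if_pos hgp]
      have hg' : g ∈ stepB ts p := by
        refine List.mem_filter.mpr ⟨hg, ?_⟩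
        simp only [beq_iff_eq]
        rw [hgp]; exact hfbest
      exact hmin' g hg'
    · simp only [pyLtL, if_neg hgp]
      rw [hfbest]
      exact hbestle _ (List.mem_map.mpr ⟨g, hg, rfl⟩)
  termination_by order => order.length

-- ===== VERDICT (by name: the statement is the Claim_ definition above) =====
theorem normalize_order_spec : Claim_equal_normalize_order := by
  intro order _
  unfold Spec_normalize_order
  have hA : normalize_order order
      = pyMin (pvTransformsB.map (fun g => order.map (fun p => g p.1 p.2))) := rfl
  obtain ⟨hne, hall⟩ := keyB order pvTransformsB (by simp [pvTransformsB])
  unfold normalize_order_alt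
  cases hs : order.foldl stepB pvTransformsB with
  | nil => exact absurd hs hne
  | cons f fs =>
    simp only []
    obtain ⟨hfts, hmin⟩ := hall f (hs ▸ List.mem_cons_self)
    have hcne : pvTransformsB.map (fun g => order.map (fun p => g p.1 p.2)) ≠ [] := by
      simp [pvTransformsB]
    obtain ⟨hmmem, hmle⟩ := pyMin_spec _ hcne
    obtain ⟨g, hg, hgm⟩ := List.mem_map.mp hmmem
    have h1 : pyLtL (pyMin (pvTransformsB.map (fun g => order.map (fun p => g p.1 p.2))))
        (order.map (fun p => f p.1 p.2)) = false := by
      rw [← hgm]; exact hmin g hg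
    have h2 : pyLtL (order.map (fun p => f p.1 p.2))
        (pyMin (pvTransformsB.map (fun g => order.map (fun p => g p.1 p.2)))) = false :=
      hmle _ (List.mem_map.mpr ⟨f, hfts, rfl⟩)
    rw [hA]
    exact ltL_connex h1 h2
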